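-- pv_equiv track=rewrite | github.com/TGChenZP/AFLBrownlowPredictor_ML__2023 | notebooks/YangZhou.py | _find_horizontal
-- ===== SOURCE A (Python) =====
-- def _find_horizontal(surrounding_combos, core):
--     """ Helper that finds the treatment and nulls block from a 'Horizontal' vector move """
--
--     treatment = list()
--     null = list()
--     direction = list()
--
--     for i in range(len(core)):
--
--         for move in [-1, 1]:
--             treatment_target = core[i] + move
--             null_target = core[i]
--
--             treatment_tmp = list()
--             null_tmp = list()
--
--             for vector in surrounding_combos:
--                 if vector[i] == treatment_target:
--                     treatment_tmp.append(vector)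
--                 elif vector[i] == null_target:
--                     null_tmp.append(vector)
--
--             treatment.append(treatment_tmp)
--             null.append(null_tmp)
--             direction.append([move if j == i else 0 for j in range(len(core))])
--
--     return treatment, null, direction
-- ===== SOURCE B (Python) =====
-- def _find_horizontal(surrounding_combos, core):
--     """ Finds the treatment and null blocks from a 'Horizontal' vector move,
--     via one grouping pass per dimension instead of a rescan per move. """
--
--     treatment = list()
--     null = list()
--     direction = list()
--
--     n = len(core)
--     for i in range(n):
--         grouped = {}
--         for vector in surrounding_combos:
--             grouped.setdefault(vector[i], []).append(vector)
--
--         for move in (-1, 1):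
--             treatment.append(grouped.get(core[i] + move, []))
--             null.append(grouped.get(core[i], []))
--             direction.append([move if j == i else 0 for j in range(n)])
--
--     return treatment, null, direction
-- ===== Notes on version B (the rewrite author's own statement) =====
-- stated objective: alternative
-- what changed: Instead of rescanning surrounding_combos once per move (two scans per dimension), B builds one insertion-ordered dict per dimension grouping vectors by their i-th coordinate, then answers each move with constant-time lookups.
import Mathlib
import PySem

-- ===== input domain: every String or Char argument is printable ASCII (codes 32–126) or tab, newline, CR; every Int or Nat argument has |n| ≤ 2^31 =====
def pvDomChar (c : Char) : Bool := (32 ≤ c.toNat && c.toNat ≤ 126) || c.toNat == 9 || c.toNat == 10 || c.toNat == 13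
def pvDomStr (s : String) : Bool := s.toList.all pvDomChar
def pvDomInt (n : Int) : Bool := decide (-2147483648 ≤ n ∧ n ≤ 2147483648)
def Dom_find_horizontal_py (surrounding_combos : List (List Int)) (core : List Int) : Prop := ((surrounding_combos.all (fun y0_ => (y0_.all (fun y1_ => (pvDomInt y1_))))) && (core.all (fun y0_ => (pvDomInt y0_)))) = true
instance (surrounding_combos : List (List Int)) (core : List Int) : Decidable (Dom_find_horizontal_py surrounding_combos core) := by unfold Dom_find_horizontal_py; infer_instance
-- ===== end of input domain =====

-- B replaces A's two full rescans of surrounding_combos per dimension by one grouping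
-- dict per dimension plus constant-time lookups per move (same cost class; alternative structure).

-- ===== PORT A =====
-- A, literally: for each i, for each move in [-1,1], one scan over surrounding_combos
-- appending into treatment_tmp / null_tmp (vector[i] read with getD; in range under Pre_).
def find_horizontal_py (surrounding_combos : List (List Int)) (core : List Int) : List (List (List Int)) × List (List (List Int)) × List (List Int) :=
  (List.range core.length).foldl
    (fun (st : List (List (List Int)) × List (List (List Int)) × List (List Int)) i =>
      ([(-1 : Int), 1]).foldl
        (fun st move =>
          let treatment_target := core.getD i 0 + move
          let null_target := core.getD i 0
          let tmp := surrounding_combos.foldl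
            (fun (p : List (List Int) × List (List Int)) vector =>
              if vector.getD i 0 = treatment_target then (p.1 ++ [vector], p.2)
              else if vector.getD i 0 = null_target then (p.1, p.2 ++ [vector])
              else p)
            ([], [])
          (st.1 ++ [tmp.1], st.2.1 ++ [tmp.2],
           st.2.2 ++ [(List.range core.length).map (fun j => if j = i then move else (0 : Int))]))
        st)
    ([], [], [])

-- ===== PORT B =====
-- B, literally: per dimension build grouped = {value -> vectors with vector[i] == value}
-- in one pass (setdefault+append), then per move two grouped.get lookups.
def find_horizontal_py_alt (surrounding_combos : List (List Int)) (core : List Int) : List (List (List Int)) × List (List (List Int)) × List (List Int) :=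
  (List.range core.length).foldl
    (fun (st : List (List (List Int)) × List (List (List Int)) × List (List Int)) i =>
      let grouped := surrounding_combos.foldl
        (fun (d : PySem.Dict Int (List (List Int))) vector =>
          d.insert (vector.getD i 0) (d.getD (vector.getD i 0) [] ++ [vector]))
        PySem.Dict.empty
      ([(-1 : Int), 1]).foldl
        (fun st move =>
          (st.1 ++ [grouped.getD (core.getD i 0 + move) []],
           st.2.1 ++ [grouped.getD (core.getD i 0) []],
           st.2.2 ++ [(List.range core.length).map (fun j => if j = i then move else (0 : Int))]))
        st)
    ([], [], [])

-- ===== PRECONDITION & SPEC =====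
-- Pre_ excludes exactly the inputs where Python A raises IndexError: some vector shorter than core.
def Pre_find_horizontal_py (surrounding_combos : List (List Int)) (core : List Int) : Prop :=
  ∀ v ∈ surrounding_combos, core.length ≤ v.length
instance (surrounding_combos : List (List Int)) (core : List Int) : Decidable (Pre_find_horizontal_py surrounding_combos core) := by unfold Pre_find_horizontal_py; infer_instance

def pvWitness_find_horizontal_py : List (List Int) × List Int :=
  ([[1, 2], [0, 2], [1, 1]], [1, 2])

def Spec_find_horizontal_py (surrounding_combos : List (List Int)) (core : List Int) (out : List (List (List Int)) × List (List (List Int)) × List (List Int)) : Prop := out = find_horizontal_py_alt surrounding_combos core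
instance (surrounding_combos : List (List Int)) (core : List Int) (out : List (List (List Int)) × List (List (List Int)) × List (List Int)) : Decidable (Spec_find_horizontal_py surrounding_combos core out) := by unfold Spec_find_horizontal_py; infer_instance

-- ===== CLAIM (what is proved, stated in full; the proofs are below) =====
def Claim_equal_find_horizontal_py : Prop := ∀ (surrounding_combos : List (List Int)) (core : List Int), Dom_find_horizontal_py surrounding_combos core → Pre_find_horizontal_py surrounding_combos core → Spec_find_horizontal_py surrounding_combos core (find_horizontal_py surrounding_combos core)

-- ===== LEMMAS AND PROOFS =====

-- A's inner scan is a pair of filters (the elif never fires on a treatment match since tt ≠ nt).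
lemma partA_eq_filters (f : List Int → Int) (sc : List (List Int)) (tt nt : Int)
    (htn : tt ≠ nt) (acc : List (List Int) × List (List Int)) :
    sc.foldl
      (fun (p : List (List Int) × List (List Int)) vector =>
        if f vector = tt then (p.1 ++ [vector], p.2)
        else if f vector = nt then (p.1, p.2 ++ [vector])
        else p)
      acc
    = (acc.1 ++ sc.filter (fun v => f v = tt),
       acc.2 ++ sc.filter (fun v => f v = nt)) := by
  induction sc generalizing acc with
  | nil => simp
  | cons v rest ih =>
    simp only [List.foldl_cons, List.filter_cons]
    have htn' : ¬ nt = tt := fun e => htn e.symm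
    by_cases h1 : f v = tt
    · have h2 : ¬ (f v = nt) := by rw [h1]; exact htn
      simp [h1, ih, htn]
    · by_cases h2 : f v = nt
      · simp [h2, ih, htn']
      · simp [h1, h2, ih]

-- B's grouping dict looked up at any key yields exactly that filter.
lemma groupB_getD (f : List Int → Int) (sc : List (List Int))
    (d : PySem.Dict Int (List (List Int))) (a : Int) :
    (sc.foldl
      (fun (d : PySem.Dict Int (List (List Int))) vector =>
        d.insert (f vector) (d.getD (f vector) [] ++ [vector]))
      d).getD a []
    = d.getD a [] ++ sc.filter (fun v => f v = a) := by
  induction sc generalizing d with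
  | nil => simp
  | cons v rest ih =>
    simp only [List.foldl_cons, List.filter_cons, ih]
    by_cases h : f v = a
    · subst h; simp
    · have h' : a ≠ f v := fun e => h e.symm
      simp [PySem.Dict.getD_insert, h', h]

-- ===== VERDICT (by name: the statement is the Claim_ definition above) =====
theorem find_horizontal_py_spec : Claim_equal_find_horizontal_py := by
  intro sc core _ _
  unfold Spec_find_horizontal_py find_horizontal_py find_horizontal_py_alt
  apply PySem.List.foldl_congr_mem
  intro st i _
  simp only [List.foldl_cons, List.foldl_nil]
  have h1 : (core.getD i 0 + -1) ≠ core.getD i 0 := by omega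
  have h2 : (core.getD i 0 + 1) ≠ core.getD i 0 := by omega
  rw [partA_eq_filters (fun v => v.getD i 0) sc _ _ h1,
      partA_eq_filters (fun v => v.getD i 0) sc _ _ h2,
      groupB_getD (fun v => v.getD i 0) sc PySem.Dict.empty (core.getD i 0 + -1),
      groupB_getD (fun v => v.getD i 0) sc PySem.Dict.empty (core.getD i 0 + 1),
      groupB_getD (fun v => v.getD i 0) sc PySem.Dict.empty (core.getD i 0)]
  simp [PySem.Dict.getD_empty]
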